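-- pv_equiv track=rewrite | github.com/timlong/testdemo | src/content.py | _filter_highest_priority
-- ===== SOURCE A (Python) =====
-- def _filter_highest_priority(ret):
--     try:
--         highest_priority = int(max(list(set([s["_rule"]["priority"] for s in ret]))))    # distinct the priority list ,and then get the max
--         result = []
--         for s in ret:
--             if s["_rule"]["priority"] == highest_priority:
--                 result.append(s)
--         return result
--     except Exception:
--         return ret
-- ===== SOURCE B (Python) =====
-- def _filter_highest_priority(ret):
--     try:
--         best = None
--         winners = []
--         for s in ret:
--             p = s["_rule"]["priority"]
--             if best is None or p > best:
--                 best = p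
--                 winners = [s]
--             elif p == best:
--                 winners.append(s)
--         return winners if best is not None else ret
--     except Exception:
--         return ret
-- ===== Notes on version B (the rewrite author's own statement) =====
-- stated objective: alternative
-- what changed: Replaces A's two staged passes (dedup+max over all priorities, then an equality-filter pass) by a single running-maximum pass that resets/extends a winners accumulator as it goes.
import Mathlib
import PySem

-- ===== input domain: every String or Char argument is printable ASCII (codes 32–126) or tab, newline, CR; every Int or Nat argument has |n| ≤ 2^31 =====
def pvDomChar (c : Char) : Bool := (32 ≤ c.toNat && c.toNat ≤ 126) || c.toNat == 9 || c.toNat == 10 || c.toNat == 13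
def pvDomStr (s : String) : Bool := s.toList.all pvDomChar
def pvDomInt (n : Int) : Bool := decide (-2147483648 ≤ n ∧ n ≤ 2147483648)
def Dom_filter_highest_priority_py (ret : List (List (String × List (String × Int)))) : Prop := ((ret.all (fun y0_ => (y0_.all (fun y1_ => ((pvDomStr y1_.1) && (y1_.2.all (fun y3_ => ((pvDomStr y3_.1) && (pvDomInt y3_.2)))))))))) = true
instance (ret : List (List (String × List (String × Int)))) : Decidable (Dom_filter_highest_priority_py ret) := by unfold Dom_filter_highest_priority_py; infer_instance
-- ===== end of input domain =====

-- B replaces A's two staged passes (dedup+max over all priorities, then an equality filter)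
-- by a single running-maximum pass with a winners accumulator (objective: alternative).

-- s["_rule"]["priority"]: two dict lookups; none = KeyError (caught by the try/except)
def pvPrio (s : List (String × List (String × Int))) : Option Int :=
  match PySem.Dict.get? (PySem.Dict.mk s) "_rule" with
  | none => none
  | some r => PySem.Dict.get? (PySem.Dict.mk r) "priority"

-- ===== PORT A =====
-- [s["_rule"]["priority"] for s in ret]: none = the comprehension raised KeyError
def pvPriosA (ret : List (List (String × List (String × Int)))) : Option (List Int) :=
  match ret with
  | [] => some []
  | s :: rest =>
    match pvPrio s with
    | none => none
    | some p => (pvPriosA rest).map (p :: ·)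

-- int(max(list(set(prios)))) on Python ints: int() is the identity; max over the set's
-- distinct elements (result independent of set iteration order), then the equality-filter loop.
def filter_highest_priority_py (ret : List (List (String × List (String × Int)))) : List (List (String × List (String × Int))) :=
  match pvPriosA ret with
  | none => ret                                   -- except: return ret
  | some ps =>
    match PySem.List.max? (PySem.Set.ofList ps) (fun x => x) with
    | none => ret                                 -- max([]) raised ValueError: return ret
    | some hp => ret.filter (fun s => pvPrio s == some hp)

-- ===== PORT B =====
-- B's single loop: state = none (best is None) or some (best, winners); the outer
-- Option is the try/except (none = KeyError at the current item, caught → ret).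
def pvLoopB (ret : List (List (String × List (String × Int))))
    (st : Option (Int × List (List (String × List (String × Int))))) :
    Option (Option (Int × List (List (String × List (String × Int))))) :=
  match ret with
  | [] => some st
  | s :: rest =>
    match pvPrio s with
    | none => none
    | some p =>
      match st with
      | none => pvLoopB rest (some (p, [s]))
      | some (b, ws) =>
        if b < p then pvLoopB rest (some (p, [s]))
        else if p == b then pvLoopB rest (some (b, ws ++ [s]))
        else pvLoopB rest (some (b, ws))

def filter_highest_priority_py_alt (ret : List (List (String × List (String × Int)))) : List (List (String × List (String × Int))) :=
  match pvLoopB ret none with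
  | none => ret                                   -- except: return ret
  | some none => ret                              -- best is None (ret was empty): return ret
  | some (some (_, ws)) => ws                     -- return winners

-- ===== PRECONDITION & SPEC =====
def Spec_filter_highest_priority_py (ret : List (List (String × List (String × Int)))) (out : List (List (String × List (String × Int)))) : Prop := out = filter_highest_priority_py_alt ret
instance (ret : List (List (String × List (String × Int)))) (out : List (List (String × List (String × Int)))) : Decidable (Spec_filter_highest_priority_py ret out) := by unfold Spec_filter_highest_priority_py; infer_instance

-- ===== CLAIM (what is proved, stated in full; the proofs are below) =====
def Claim_equal_filter_highest_priority_py : Prop := ∀ (ret : List (List (String × List (String × Int)))), Dom_filter_highest_priority_py ret → Spec_filter_highest_priority_py ret (filter_highest_priority_py ret)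

-- ===== LEMMAS AND PROOFS =====

-- B's loop fails (KeyError) exactly where A's comprehension does
theorem pvLoopB_none_iff (ret : List (List (String × List (String × Int))))
    (st : Option (Int × List (List (String × List (String × Int))))) :
    pvLoopB ret st = none ↔ pvPriosA ret = none := by
  induction ret generalizing st with
  | nil => simp [pvLoopB, pvPriosA]
  | cons s rest ih =>
    simp only [pvLoopB, pvPriosA]
    cases pvPrio s with
    | none => simp
    | some p =>
      cases st with
      | none => simpa using ih _
      | some bw =>
        obtain ⟨b, ws⟩ := bw
        dsimp only
        by_cases h1 : b < p
        · simpa [h1] using ih _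
        · by_cases h2 : (p == b) = true
          · rw [if_neg h1, if_pos h2, ih _]; simp
          · rw [if_neg h1, if_neg h2, ih _]; simp

-- A's filter pass in terms of the priority list zipped with ret
theorem pvFilter_eq (ret : List (List (String × List (String × Int)))) (ps : List Int)
    (h : pvPriosA ret = some ps) (hp : Int) :
    ret.filter (fun s => pvPrio s == some hp)
      = ((ps.zip ret).filter (fun q => q.1 == hp)).map (·.2) := by
  induction ret generalizing ps with
  | nil => simp [pvPriosA] at h; simp [h]
  | cons s rest ih =>
    simp only [pvPriosA] at h
    cases hps : pvPrio s with
    | none => simp [hps] at h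
    | some p =>
      rw [hps] at h
      cases hq : pvPriosA rest with
      | none => simp [hq] at h
      | some ps' =>
        rw [hq] at h
        simp only [Option.map_some, Option.some.injEq] at h
        subst h
        simp only [List.zip, List.zipWith, List.filter_cons, hps]
        have ihr := ih ps' hq
        simp only [List.zip] at ihr
        by_cases hpe : p = hp
        · subst hpe; simp [ihr]
        · simp [hpe, ihr]

-- the running-max invariant: from state (b, ws) the loop ends in the max M of b and the
-- remaining priorities, with winners = (ws if b attains M) ++ the remaining items at M
theorem pvLoopB_inv (ret : List (List (String × List (String × Int)))) (ps : List Int)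
    (h : pvPriosA ret = some ps) (b : Int) (ws : List (List (String × List (String × Int)))) :
    pvLoopB ret (some (b, ws))
      = some (some (ps.foldl max b,
          (if b = ps.foldl max b then ws else [])
            ++ ((ps.zip ret).filter (fun q => q.1 == ps.foldl max b)).map (·.2))) := by
  induction ret generalizing ps b ws with
  | nil => simp [pvPriosA] at h; simp [h, pvLoopB]
  | cons s rest ih =>
    simp only [pvPriosA] at h
    cases hps : pvPrio s with
    | none => simp [hps] at h
    | some p =>
      rw [hps] at h
      cases hq : pvPriosA rest with
      | none => simp [hq] at h
      | some ps' =>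
        rw [hq] at h
        simp only [Option.map_some, Option.some.injEq] at h
        subst h
        simp only [pvLoopB, hps, List.foldl_cons, List.zip, List.zipWith, List.filter_cons]
        have hM := (PySem.List.le_foldl_max ps' (max b p)).1
        by_cases h1 : b < p
        · have hbp : max b p = p := by omega
          rw [if_pos h1, ih ps' hq]
          simp only [hbp]
          have hbne : ¬ b = ps'.foldl max p := by
            rw [hbp] at hM; omega
          rw [if_neg hbne]
          by_cases h2 : p = ps'.foldl max p
          · rw [if_pos (show (p == ps'.foldl max p) = true by simpa using h2), if_pos h2]
            rfl
          · rw [if_neg (show ¬ (p == ps'.foldl max p) = true by simpa using h2), if_neg h2]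
            rfl
        · have hbp : max b p = b := by omega
          rw [if_neg h1]
          by_cases h2 : p = b
          · rw [if_pos (show (p == b) = true by simpa using h2), ih ps' hq]
            simp only [hbp]
            by_cases h3 : b = ps'.foldl max b
            · rw [if_pos h3, if_pos h3,
                if_pos (show (p == ps'.foldl max b) = true by simp [h2, ← h3])]
              simp [List.zip]
            · rw [if_neg h3, if_neg h3,
                if_neg (show ¬ (p == ps'.foldl max b) = true by simp [h2, h3])]
              rfl
          · rw [if_neg (show ¬ (p == b) = true by simpa using h2), ih ps' hq]
            simp only [hbp]
            rw [if_neg (show ¬ (p == ps'.foldl max b) = true by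
              have := (PySem.List.le_foldl_max ps' b).1
              simp only [beq_iff_eq]; omega)]
            rfl

-- foldl max b ps is attained by b or an element of ps
theorem pvFoldlMaxSpec (ps : List Int) (b : Int) :
    (ps.foldl max b = b ∨ ps.foldl max b ∈ ps)
      ∧ b ≤ ps.foldl max b ∧ ∀ x ∈ ps, x ≤ ps.foldl max b := by
  refine ⟨PySem.List.foldl_max_mem ps b, (PySem.List.le_foldl_max ps b).1,
    (PySem.List.le_foldl_max ps b).2⟩

-- A's max over the deduplicated set equals B's running max, for nonempty priority lists
theorem pvMaxAgree (p : Int) (ps : List Int) :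
    PySem.List.max? (PySem.Set.ofList (p :: ps)) (fun x => x) = some (ps.foldl max p) := by
  cases hm : PySem.List.max? (PySem.Set.ofList (p :: ps)) (fun x => x) with
  | none =>
    rw [PySem.List.max?_eq_none_iff] at hm
    have : p ∈ PySem.Set.ofList (p :: ps) := by
      rw [PySem.Set.mem_ofList]; simp
    rw [hm] at this; simp at this
  | some m =>
    have hmem : m ∈ p :: ps := by
      have := PySem.List.max?_mem hm; rwa [PySem.Set.mem_ofList] at this
    have hmax : ∀ y ∈ p :: ps, y ≤ m := by
      intro y hy
      exact PySem.List.max?_isMax hm y (by rwa [PySem.Set.mem_ofList])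
    obtain ⟨hattn, hle, hiso⟩ := pvFoldlMaxSpec ps p
    have h1 : m ≤ ps.foldl max p := by
      rcases List.mem_cons.mp hmem with h | h
      · omega
      · exact hiso _ h
    have h2 : ps.foldl max p ≤ m := by
      rcases hattn with h | h
      · rw [h]; exact hmax p (by simp)
      · exact hmax _ (by simp [h])
    exact congrArg some (le_antisymm h1 h2)

-- ===== VERDICT (by name: the statement is the Claim_ definition above) =====
theorem filter_highest_priority_py_spec : Claim_equal_filter_highest_priority_py := by
  intro ret _
  unfold Spec_filter_highest_priority_py
  cases ret with
  | nil => rfl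
  | cons s rest =>
    unfold filter_highest_priority_py filter_highest_priority_py_alt
    cases hps : pvPrio s with
    | none =>
      have hA : pvPriosA (s :: rest) = none := by simp [pvPriosA, hps]
      have hB : pvLoopB (s :: rest) none = none := (pvLoopB_none_iff _ _).mpr hA
      rw [hA, hB]
    | some p =>
      cases hq : pvPriosA rest with
      | none =>
        have hA : pvPriosA (s :: rest) = none := by simp [pvPriosA, hps, hq]
        have hB : pvLoopB (s :: rest) none = none := (pvLoopB_none_iff _ _).mpr hA
        rw [hA, hB]
      | some ps' =>
        have hA : pvPriosA (s :: rest) = some (p :: ps') := by simp [pvPriosA, hps, hq]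
        have hB : pvLoopB (s :: rest) none = pvLoopB rest (some (p, [s])) := by
          simp [pvLoopB, hps]
        rw [hA, hB, pvLoopB_inv rest ps' hq p [s]]
        dsimp only
        rw [pvMaxAgree]
        dsimp only
        rw [pvFilter_eq (s :: rest) (p :: ps') hA (ps'.foldl max p)]
        simp only [List.zip, List.zipWith, List.filter_cons]
        by_cases h3 : p = ps'.foldl max p
        · simp [← h3]
        · simp [h3]
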